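-- pv_equiv track=rewrite | github.com/victorkolis/PythonMaster | CODEWARS/6kyu/PALINDROMIZATION/main.py | palindromization
-- ===== SOURCE A (Python) =====
-- def palindromization(pattern: str, amount: int) -> str:
-- 	if pattern == '' or amount == 1:
-- 		return 'Error!'
--
-- 	palindromized = []
-- 	index = 0
-- 	for iteration in range(amount):
-- 		if len(palindromized) >= 2:
-- 			try:
-- 				palindromized.insert(len(palindromized)//2, pattern[index])
-- 			except IndexError:
-- 				index = 0
-- 				palindromized.insert(len(palindromized) // 2, pattern[index])
-- 		else:
-- 			palindromized += [pattern[0]]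
--
-- 		if iteration % 2 != 0:
-- 			index += 1
--
-- 	return ''.join(palindromized)
-- ===== SOURCE B (Python) =====
-- def palindromization(pattern: str, amount: int) -> str:
--     if pattern == '' or amount == 1:
--         return 'Error!'
--     n = len(pattern)
--     left = [pattern[i % n] for i in range((amount + 1) // 2)]
--     return ''.join(left) + ''.join(reversed(left[:amount // 2]))
-- ===== Notes on version B (the rewrite author's own statement) =====
-- stated objective: faster
-- what changed: Replaces the loop of repeated middle insertions into a growing list (each insert shifting half the list) by a closed-form construction: the first ceil(amount/2) characters are pattern[i % len(pattern)], and the result is that half followed by its mirrored first floor(amount/2) characters, built in one linear pass.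
import Mathlib
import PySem

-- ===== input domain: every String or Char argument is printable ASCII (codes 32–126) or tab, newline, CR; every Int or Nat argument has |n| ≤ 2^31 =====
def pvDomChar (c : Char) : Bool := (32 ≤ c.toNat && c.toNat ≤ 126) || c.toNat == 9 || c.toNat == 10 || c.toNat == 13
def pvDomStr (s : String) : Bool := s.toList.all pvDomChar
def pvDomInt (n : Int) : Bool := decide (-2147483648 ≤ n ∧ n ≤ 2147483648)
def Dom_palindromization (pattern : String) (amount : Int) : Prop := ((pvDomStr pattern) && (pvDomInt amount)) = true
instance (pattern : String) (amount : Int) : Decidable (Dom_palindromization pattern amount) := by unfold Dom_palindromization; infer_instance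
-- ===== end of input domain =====

-- B replaces A's repeated insert-at-middle loop by a closed-form construction of the left
-- half (pattern cycled) plus its mirror; objective: faster.


-- ===== PORT A =====
-- one iteration of A's for-loop; state = (palindromized, index)
def pvStepA (pattern : String) (st : List Char × Int) (iteration : Int) : List Char × Int :=
  let st' :=
    if 2 ≤ st.1.length then
      match PySem.Str.pyGet? pattern st.2 with
      | some c => (PySem.List.insert st.1 (PySem.Int.floordiv (st.1.length : Int) 2) c, st.2)
      | none =>
          -- except IndexError: index = 0, then insert pattern[index];
          -- pattern[0] cannot raise here (pattern ≠ '' is guaranteed by the early return), so .getD ' ' is never taken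
          (PySem.List.insert st.1 (PySem.Int.floordiv (st.1.length : Int) 2)
            ((PySem.Str.pyGet? pattern 0).getD ' '), 0)
    else
      -- palindromized += [pattern[0]]; pattern ≠ '' guaranteed, .getD ' ' never taken
      (st.1 ++ [(PySem.Str.pyGet? pattern 0).getD ' '], st.2)
  if PySem.Int.mod iteration 2 ≠ 0 then (st'.1, st'.2 + 1) else st'

def palindromization (pattern : String) (amount : Int) : String :=
  if pattern = "" ∨ amount = 1 then "Error!"
  else String.mk (((PySem.List.pyRange 0 amount 1).foldl (pvStepA pattern) ([], 0)).1)

-- ===== PORT B =====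
def palindromization_alt (pattern : String) (amount : Int) : String :=
  if pattern = "" ∨ amount = 1 then "Error!"
  else
    let n : Int := (pattern.toList.length : Int)
    let left := (PySem.List.pyRange 0 (PySem.Int.floordiv (amount + 1) 2)).map
      (fun i => (PySem.Str.pyGet? pattern (PySem.Int.mod i n)).getD ' ')  -- i % n < n: never none
    String.mk (left ++ (left.take (PySem.Int.floordiv amount 2).toNat).reverse)

-- ===== PRECONDITION & SPEC =====
def Spec_palindromization (pattern : String) (amount : Int) (out : String) : Prop := out = palindromization_alt pattern amount
instance (pattern : String) (amount : Int) (out : String) : Decidable (Spec_palindromization pattern amount out) := by unfold Spec_palindromization; infer_instance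

-- ===== CLAIM (what is proved, stated in full; the proofs are below) =====
def Claim_equal_palindromization : Prop := ∀ (pattern : String) (amount : Int), Dom_palindromization pattern amount → Spec_palindromization pattern amount (palindromization pattern amount)

-- ===== LEMMAS AND PROOFS =====

-- the cycling character pattern[i % n], A's list after k iterations (pvPal) and A's index variable (pvIdx)
def pvG (cs : List Char) (i : Nat) : Char := cs.getD (i % cs.length) ' '
def pvL (cs : List Char) (k : Nat) : List Char := (List.range ((k+1)/2)).map (pvG cs)
def pvPal (cs : List Char) (k : Nat) : List Char := pvL cs k ++ ((pvL cs k).take (k/2)).reverse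
def pvIdx (n k : Nat) : Int :=
  if k % 2 = 0 ∧ (k/2) % n = 0 ∧ k/2 ≠ 0 then (n : Int) else (((k/2) % n : Nat) : Int)

theorem pv_even_ins (cs : List Char) (m : Nat) :
    (pvPal cs (2*m)).take m ++ pvG cs m :: (pvPal cs (2*m)).drop m = pvPal cs (2*m+1) := by
  have hL : (pvL cs (2*m)).length = m := by simp [pvL]; omega
  have hLL : (pvL cs (2*m)).take ((2*m)/2) = pvL cs (2*m) := by
    rw [List.take_of_length_le (by omega)]
  have hLsucc : pvL cs (2*m+1) = pvL cs (2*m) ++ [pvG cs m] := by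
    simp [pvL, show (2*m+1+1)/2 = m+1 by omega, show (2*m+1)/2 = m by omega, List.range_succ]
  have htake : (pvPal cs (2*m)).take m = pvL cs (2*m) := by
    rw [pvPal, hLL, List.take_left' hL]
  have hdrop : (pvPal cs (2*m)).drop m = (pvL cs (2*m)).reverse := by
    rw [pvPal, hLL, List.drop_left' hL]
  rw [htake, hdrop, pvPal, hLsucc, show (2*m+1)/2 = m by omega]
  rw [List.take_left' hL]
  simp

theorem pv_odd_ins (cs : List Char) (m : Nat) :
    (pvPal cs (2*m+1)).take m ++ pvG cs m :: (pvPal cs (2*m+1)).drop m = pvPal cs (2*m+2) := by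
  have hL : (pvL cs (2*m)).length = m := by simp [pvL]; omega
  have hLsucc : pvL cs (2*m+1) = pvL cs (2*m) ++ [pvG cs m] := by
    simp [pvL, show (2*m+1+1)/2 = m+1 by omega, show (2*m+1)/2 = m by omega, List.range_succ]
  have hPal : pvPal cs (2*m+1) = pvL cs (2*m) ++ pvG cs m :: (pvL cs (2*m)).reverse := by
    rw [pvPal, show (2*m+1)/2 = m by omega, hLsucc, List.take_left' hL]
    simp
  have hL2 : pvL cs (2*m+2) = pvL cs (2*m) ++ [pvG cs m] := by
    rw [← hLsucc]
    simp [pvL, show (2*m+2+1)/2 = m+1 by omega, show (2*m+1+1)/2 = m+1 by omega]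
  rw [hPal, List.take_left' hL, List.drop_left' hL]
  rw [pvPal, hL2, show (2*m+2)/2 = m+1 by omega,
      List.take_of_length_le (by simp [hL])]
  simp

theorem pv_insert_natCast (xs : List Char) (m : Nat) (h : m ≤ xs.length) (v : Char) :
    PySem.List.insert xs (m : Int) v = xs.take m ++ v :: xs.drop m := by
  have hk : (if (m:Int) < 0 then max ((m:Int) + xs.length) 0 else min (m:Int) xs.length).toNat = m := by
    split <;> omega
  simp [PySem.List.insert, PySem.List.sliceIndices, hk]

theorem pv_get_lt (cs : List Char) (j : Nat) (h : j < cs.length) :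
    PySem.Chars.pyGet? cs (j : Int) = some (cs.getD j ' ') := by
  simp [PySem.Chars.pyGet?, PySem.List.pyGet?, PySem.List.pyIdx?, h,
        List.getD_eq_getElem?_getD]

theorem pv_get_len (cs : List Char) : PySem.Chars.pyGet? cs ((cs.length : Nat) : Int) = none := by
  simp [PySem.Chars.pyGet?, PySem.List.pyGet?, PySem.List.pyIdx?]

theorem pvIdx_zero (n : Nat) : pvIdx n 0 = 0 := by
  rw [pvIdx, if_neg (fun hc => hc.2.2 rfl)]
  norm_num

theorem pvPal_length (cs : List Char) (k : Nat) : (pvPal cs k).length = k := by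
  simp [pvPal, pvL]; omega

theorem pv_succ_mod (m n : Nat) (hn : 0 < n) :
    (m + 1) % n = if m % n + 1 = n then 0 else m % n + 1 := by
  have h1 : (m + 1) % n = (m % n + 1 % n) % n := Nat.add_mod m 1 n
  rcases Nat.lt_or_ge 1 n with h | h
  · rw [Nat.mod_eq_of_lt h] at h1
    have hr : m % n < n := Nat.mod_lt _ hn
    by_cases he : m % n + 1 = n
    · simp [h1, he]
    · rw [h1, Nat.mod_eq_of_lt (by omega)]
      simp [he]
  · have hn1 : n = 1 := by omega
    subst hn1
    simp [Nat.mod_one]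

theorem pvStepA_inv (pattern : String) (h : pattern.toList ≠ []) (k : Nat) :
    pvStepA pattern (pvPal pattern.toList k, pvIdx pattern.toList.length k) (k : Int)
      = (pvPal pattern.toList (k+1), pvIdx pattern.toList.length (k+1)) := by
  have hn : 0 < pattern.toList.length := List.length_pos_iff.mpr h
  have hlen := pvPal_length pattern.toList k
  have hget0 : PySem.Chars.pyGet? pattern.toList 0 = some (pattern.toList.getD 0 ' ') := by
    simpa using pv_get_lt pattern.toList 0 hn
  have hg00 : pattern.toList.getD 0 ' ' = pvG pattern.toList 0 := by
    simp [pvG]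
  rcases Nat.lt_or_ge k 2 with hk2 | hk2
  · -- k = 0 or 1: short-list branch, appends pattern[0]
    have hI0 : pvIdx pattern.toList.length 0 = 0 := by
      rw [pvIdx, if_neg (fun hc => hc.2.2 rfl)]
      norm_num
    have hI1 : pvIdx pattern.toList.length 1 = 0 := by
      rw [pvIdx, if_neg (fun hc => by omega)]
      norm_num
    interval_cases k
    · have hP0 : pvPal pattern.toList 0 = [] := by simp [pvPal, pvL]
      have hP1 : pvPal pattern.toList 1 = [pvG pattern.toList 0] := by
        simp [pvPal, pvL, List.range_succ]
      have hmod : PySem.Int.mod ((0:Nat):Int) 2 = 0 := by simpa using PySem.Int.mod_natCast 0 2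
      simp only [pvStepA, PySem.Str.pyGet?, hP0, hP1, hmod, hget0, hg00, hI0, hI1]
      simp
    · have hP1 : pvPal pattern.toList 1 = [pvG pattern.toList 0] := by
        simp [pvPal, pvL, List.range_succ]
      have hP2 : pvPal pattern.toList 2 = [pvG pattern.toList 0, pvG pattern.toList 0] := by
        simp [pvPal, pvL, List.range_succ]
      have hmod : PySem.Int.mod ((1:Nat):Int) 2 = 1 := by simpa using PySem.Int.mod_natCast 1 2
      have hI2 : pvIdx pattern.toList.length 2 = 1 := by
        rw [pvIdx]
        by_cases h1 : pattern.toList.length = 1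
        · rw [if_pos ⟨by norm_num, by rw [h1], by norm_num⟩, h1]
          norm_num
        · have h1n : (2/2) % pattern.toList.length = 1 := by
            rw [show (2:Nat)/2 = 1 by norm_num]
            exact Nat.mod_eq_of_lt (by omega)
          rw [if_neg (fun hc => by rw [h1n] at hc; omega), h1n]
          norm_num
      simp only [pvStepA, PySem.Str.pyGet?, hP1, hP2, hmod, hget0, hg00, hI1, hI2]
      simp
  · have hbr : (2 ≤ (pvPal pattern.toList k).length) = True := eq_true (by omega)
    rcases Nat.even_or_odd k with ⟨m, hm⟩ | ⟨m, hm⟩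
    · -- k = 2m, m ≥ 1, even iteration: no increment
      have hk : k = 2*m := by omega
      subst hk
      have hm1 : 1 ≤ m := by omega
      have hmod : PySem.Int.mod ((2*m : Nat) : Int) 2 = 0 := by
        simpa using PySem.Int.mod_natCast (2*m) 2
      have hdiv : PySem.Int.floordiv (((pvPal pattern.toList (2*m)).length : Nat) : Int) 2 = ((m:Nat) : Int) := by
        rw [hlen]
        simpa using PySem.Int.floordiv_natCast (2*m) 2
      have hins : PySem.List.insert (pvPal pattern.toList (2*m)) ((m:Nat):Int) (pvG pattern.toList m) = pvPal pattern.toList (2*m+1) := by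
        rw [pv_insert_natCast _ m (by omega), pv_even_ins]
      have hI' : pvIdx pattern.toList.length (2*m+1) = ((m % pattern.toList.length : Nat) : Int) := by
        rw [pvIdx, if_neg (fun hc => by omega), show (2*m+1)/2 = m by omega]
      by_cases hr : m % pattern.toList.length = 0
      · -- index == n: the except-branch fires, char = pattern[0], index reset to 0
        have hI : pvIdx pattern.toList.length (2*m) = ((pattern.toList.length : Nat) : Int) := by
          rw [pvIdx, if_pos ⟨by omega, by rw [show (2*m)/2 = m by omega]; exact hr, by omega⟩]
        have hgm : pvG pattern.toList 0 = pvG pattern.toList m := by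
          rw [pvG, pvG, hr, Nat.zero_mod]
        simp only [pvStepA, PySem.Str.pyGet?, hI, pv_get_len, hbr, if_true, hget0, hg00, hgm,
                   hdiv, hmod]
        rw [if_neg (fun hc => hc rfl), hI', hr]
        norm_num
        exact hins
      · have hI : pvIdx pattern.toList.length (2*m) = ((m % pattern.toList.length : Nat) : Int) := by
          rw [pvIdx, if_neg (fun hc => hr (by
            have h21 := hc.2.1
            rw [show (2*m)/2 = m from by omega] at h21
            exact h21)), show (2*m)/2 = m by omega]
        have hgm : pattern.toList.getD (m % pattern.toList.length) ' ' = pvG pattern.toList m := rfl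
        simp only [pvStepA, PySem.Str.pyGet?, hI,
                   pv_get_lt pattern.toList (m % pattern.toList.length) (Nat.mod_lt _ hn),
                   hbr, if_true, hgm, hdiv, hins, hmod]
        rw [if_neg (fun hc => hc rfl), hI']
    · -- k = 2m+1 odd iteration: increment; index = m % n < n, never an IndexError
      subst hm
      have hmod : PySem.Int.mod ((2*m+1 : Nat) : Int) 2 = 1 := by
        simpa using PySem.Int.mod_natCast (2*m+1) 2
      have hI : pvIdx pattern.toList.length (2*m+1) = ((m % pattern.toList.length : Nat) : Int) := by
        rw [pvIdx, if_neg (fun hc => by omega), show (2*m+1)/2 = m by omega]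
      have hdiv : PySem.Int.floordiv (((pvPal pattern.toList (2*m+1)).length : Nat) : Int) 2 = ((m:Nat) : Int) := by
        rw [hlen]
        have h2 := PySem.Int.floordiv_natCast (2*m+1) 2
        rw [show (2*m+1)/2 = m by omega] at h2
        simpa using h2
      have hins : PySem.List.insert (pvPal pattern.toList (2*m+1)) ((m:Nat):Int) (pvG pattern.toList m) = pvPal pattern.toList (2*m+2) := by
        rw [pv_insert_natCast _ m (by omega), pv_odd_ins]
      have hgm : pattern.toList.getD (m % pattern.toList.length) ' ' = pvG pattern.toList m := rfl
      have hI2 : ((m % pattern.toList.length : Nat) : Int) + 1 = pvIdx pattern.toList.length (2*m+1+1) := by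
        have hs := pv_succ_mod m pattern.toList.length hn
        rw [pvIdx, show (2*m+1+1)/2 = m+1 by omega]
        by_cases he : m % pattern.toList.length + 1 = pattern.toList.length
        · rw [if_pos ⟨by omega, by rw [hs, if_pos he], by omega⟩]
          rw [show ((m % pattern.toList.length : Nat) : Int) + 1
                = ((m % pattern.toList.length + 1 : Nat) : Int) from by push_cast; ring, he]
        · rw [if_neg (fun hc => by
            have h21 := hc.2.1
            rw [hs, if_neg he] at h21
            omega), hs, if_neg he]
          push_cast
          ring
      simp only [pvStepA, PySem.Str.pyGet?, hI,
                 pv_get_lt pattern.toList (m % pattern.toList.length) (Nat.mod_lt _ hn),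
                 hbr, if_true, hgm, hdiv, hins, hmod]
      rw [if_pos (by norm_num), hI2]

theorem pv_foldA (pattern : String) (h : pattern.toList ≠ []) (k : Nat) :
    (PySem.List.pyRange 0 (k : Int) 1).foldl (pvStepA pattern) ([], 0)
      = (pvPal pattern.toList k, pvIdx pattern.toList.length k) := by
  induction k with
  | zero =>
      simp [PySem.List.pyRange, pvPal, pvL, pvIdx_zero]
  | succ k ih =>
      rw [show ((k+1 : Nat) : Int) = (k : Int) + 1 from by push_cast; ring,
          PySem.List.pyRange_one_succ_right (by positivity), List.foldl_append]
      simp only [List.foldl_cons, List.foldl_nil, ih]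
      exact pvStepA_inv pattern h k

theorem pv_altLeft (pattern : String) (h : pattern.toList ≠ []) (a : Nat) :
    (PySem.List.pyRange 0 (PySem.Int.floordiv ((a : Int) + 1) 2)).map
      (fun i => (PySem.Str.pyGet? pattern (PySem.Int.mod i (pattern.toList.length : Int))).getD ' ')
      = pvL pattern.toList a := by
  have hn : 0 < pattern.toList.length := List.length_pos_iff.mpr h
  have hfd : PySem.Int.floordiv ((a + 1 : Nat) : Int) 2 = (((a+1)/2 : Nat) : Int) := by
    exact_mod_cast PySem.Int.floordiv_natCast (a+1) 2
  rw [show ((a : Int) + 1) = ((a + 1 : Nat) : Int) from by push_cast; ring, hfd,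
      PySem.List.pyRange_zero_natCast]
  rw [pvL, List.map_map]
  apply List.map_congr_left
  intro i _
  simp only [Function.comp_apply, PySem.Int.mod_natCast, PySem.Str.pyGet?]
  rw [pv_get_lt pattern.toList _ (Nat.mod_lt _ hn)]
  rfl

theorem pv_main (pattern : String) (amount : Int) :
    palindromization pattern amount = palindromization_alt pattern amount := by
  unfold palindromization palindromization_alt
  by_cases hc : pattern = "" ∨ amount = 1
  · simp [hc]
  · simp only [if_neg hc]
    rcases not_or.mp hc with ⟨hc1, hc2⟩
    have hp : pattern.toList ≠ [] := by
      intro he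
      apply hc1
      have h2 := congrArg String.ofList he
      rwa [String.ofList_toList] at h2
    rcases (by omega : amount ≤ 0 ∨ 0 < amount) with hle | hpos
    · have hA : PySem.List.pyRange 0 amount 1 = [] := by
        simp [PySem.List.pyRange]
        omega
      have hB : PySem.List.pyRange 0 (PySem.Int.floordiv (amount + 1) 2) 1 = [] := by
        have hq : PySem.Int.floordiv (amount + 1) 2 ≤ 0 := by
          rw [PySem.Int.floordiv_eq_ediv_of_pos (by norm_num)]
          omega
        simp [PySem.List.pyRange]
        omega
      simp only [hA, hB]
      simp
    · obtain ⟨a, ha⟩ : ∃ a : Nat, amount = (a : Int) := ⟨amount.toNat, by omega⟩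
      subst ha
      rw [pv_foldA pattern hp a]
      rw [pv_altLeft pattern hp a]
      have h2 : (PySem.Int.floordiv ((a : Nat) : Int) 2).toNat = a / 2 := by
        have h3 : PySem.Int.floordiv ((a : Nat) : Int) 2 = ((a/2 : Nat) : Int) := by
          exact_mod_cast PySem.Int.floordiv_natCast a 2
        rw [h3]
        omega
      rw [h2]
      rfl

-- ===== VERDICT (by name: the statement is the Claim_ definition above) =====
theorem palindromization_spec : Claim_equal_palindromization := by
  intro pattern amount _
  unfold Spec_palindromization
  exact pv_main pattern amount
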